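-- pv_equiv track=rewrite | github.com/ElderMedic/FAIRiAgent | fairifier/services/evidence_packets.py | _find_section_heading
-- ===== SOURCE A (Python) =====
-- from typing import Any, Dict, List, Optional
--
-- def _find_section_heading(text: str, match_pos: int) -> Optional[str]:
--     """Find the nearest Markdown or uppercase heading above a match position."""
--     prefix = text[:match_pos]
--     heading = None
--     for raw_line in prefix.splitlines():
--         line = raw_line.strip()
--         if not line:
--             continue
--         if line.startswith("#"):
--             heading = line.lstrip("# ").strip()
--         elif len(line) < 120 and line.isupper():
--             heading = line
--     return heading
-- ===== SOURCE B (Python) =====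
-- from typing import Optional
--
-- def _find_section_heading(text: str, match_pos: int) -> Optional[str]:
--     """Find the nearest Markdown or uppercase heading above a match position."""
--     for raw_line in reversed(text[:match_pos].splitlines()):
--         line = raw_line.strip()
--         if not line:
--             continue
--         if line.startswith("#"):
--             return line.lstrip("# ").strip()
--         if len(line) < 120 and line.isupper():
--             return line
--     return None
-- ===== Notes on version B (the rewrite author's own statement) =====
-- stated objective: idiomatic
-- what changed: B scans the prefix's lines in reverse and returns the first heading it meets (early exit), instead of A's full forward scan that keeps overwriting the last heading seen.
import Mathlib
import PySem

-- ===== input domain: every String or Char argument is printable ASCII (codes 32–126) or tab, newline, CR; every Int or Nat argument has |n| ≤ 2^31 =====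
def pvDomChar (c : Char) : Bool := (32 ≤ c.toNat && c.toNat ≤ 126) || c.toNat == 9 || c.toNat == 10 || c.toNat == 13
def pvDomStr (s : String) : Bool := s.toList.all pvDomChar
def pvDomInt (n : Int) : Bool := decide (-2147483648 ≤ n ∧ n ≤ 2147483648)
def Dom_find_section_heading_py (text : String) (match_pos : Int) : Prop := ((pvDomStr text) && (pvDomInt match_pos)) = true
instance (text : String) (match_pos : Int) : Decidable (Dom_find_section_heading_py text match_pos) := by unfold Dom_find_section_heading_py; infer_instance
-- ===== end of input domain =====

-- B scans the prefix's lines in reverse and returns the first heading it meets (early exit),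
-- instead of A's full forward scan that keeps overwriting the last heading seen.

-- shared primitives missing from PySem, exact on the ASCII domain:
-- line.lstrip("# ")  — drop leading '#' and ' ' characters
def pvLstripHashSpace (s : String) : String :=
  String.ofList (s.toList.dropWhile (fun c => c == '#' || c == ' '))
-- line.isupper() — at least one cased char and no lowercase char (ASCII: cased = letter)
def pvIsUpper (s : String) : Bool :=
  s.toList.any (fun c => PySem.Chars.isalpha c) && s.toList.all (fun c => !(PySem.Chars.islower c))

-- ===== PORT A =====
def find_section_heading_py (text : String) (match_pos : Int) : Option String :=
  let pre := PySem.Str.slice text none (some match_pos)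
  (PySem.Str.splitlines pre).foldl
    (fun heading raw_line =>
      let line := PySem.Str.strip raw_line
      if line == "" then heading
      else if PySem.Str.startswith line "#" then
        some (PySem.Str.strip (pvLstripHashSpace line))
      else if PySem.Str.len line < 120 && pvIsUpper line then some line
      else heading)
    none

-- ===== PORT B =====
def find_section_heading_py_alt_go : List String → Option String
  | [] => none
  | raw_line :: rest =>
    let line := PySem.Str.strip raw_line
    if line == "" then find_section_heading_py_alt_go rest
    else if PySem.Str.startswith line "#" then
      some (PySem.Str.strip (pvLstripHashSpace line))
    else if PySem.Str.len line < 120 && pvIsUpper line then some line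
    else find_section_heading_py_alt_go rest

def find_section_heading_py_alt (text : String) (match_pos : Int) : Option String :=
  find_section_heading_py_alt_go
    ((PySem.Str.splitlines (PySem.Str.slice text none (some match_pos))).reverse)

-- ===== PRECONDITION & SPEC =====
def Spec_find_section_heading_py (text : String) (match_pos : Int) (out : Option String) : Prop := out = find_section_heading_py_alt text match_pos
instance (text : String) (match_pos : Int) (out : Option String) : Decidable (Spec_find_section_heading_py text match_pos out) := by unfold Spec_find_section_heading_py; infer_instance

-- ===== CLAIM (what is proved, stated in full; the proofs are below) =====
def Claim_equal_find_section_heading_py : Prop := ∀ (text : String) (match_pos : Int), Dom_find_section_heading_py text match_pos → Spec_find_section_heading_py text match_pos (find_section_heading_py text match_pos)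

-- ===== LEMMAS AND PROOFS =====
-- the per-line heading value both programs compute
def pvLineVal (raw_line : String) : Option String :=
  let line := PySem.Str.strip raw_line
  if line == "" then none
  else if PySem.Str.startswith line "#" then
    some (PySem.Str.strip (pvLstripHashSpace line))
  else if PySem.Str.len line < 120 && pvIsUpper line then some line
  else none

theorem pvStepA (h : Option String) (raw : String) :
    (let line := PySem.Str.strip raw
     if line == "" then h
     else if PySem.Str.startswith line "#" then
       some (PySem.Str.strip (pvLstripHashSpace line))
     else if PySem.Str.len line < 120 && pvIsUpper line then some line
     else h) = (pvLineVal raw).or h := by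
  simp only [pvLineVal]
  split_ifs <;> simp [Option.or]

theorem pvGoEq (l : List String) : find_section_heading_py_alt_go l = l.findSome? pvLineVal := by
  induction l with
  | nil => rfl
  | cons x rest ih =>
      simp only [find_section_heading_py_alt_go, List.findSome?, pvLineVal, ih]
      split_ifs <;> simp

theorem pvFoldEq (l : List String) (h0 : Option String) :
    l.foldl (fun h raw => (pvLineVal raw).or h) h0 = (l.reverse.findSome? pvLineVal).or h0 := by
  induction l generalizing h0 with
  | nil => simp
  | cons x rest ih =>
      simp only [List.foldl, List.reverse_cons, List.findSome?_append, ih]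
      cases hx : pvLineVal x <;> cases hr : rest.reverse.findSome? pvLineVal <;>
        simp [List.findSome?, hx, Option.or]

-- ===== VERDICT (by name: the statement is the Claim_ definition above) =====
theorem find_section_heading_py_spec : Claim_equal_find_section_heading_py := by
  intro text match_pos _
  unfold Spec_find_section_heading_py find_section_heading_py find_section_heading_py_alt
  simp only [pvStepA, pvGoEq, pvFoldEq, Option.or_none]
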